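-- pv_equiv track=rewrite | github.com/suminb/labs | chemtalk/models.py | investigate_word
-- ===== SOURCE A (Python) =====
-- lookup_table = ('', 'h', 'he', 'li', 'be', 'b', 'c', 'n', 'o', 'f', 'ne',
--     'na', 'mg', 'al', 'si', 'p', 's', 'cl', 'ar', 'k', 'ca',
--     'sc', 'ti', 'v', 'cr', 'mn', 'fe', 'co', 'ni', 'cu', 'zn',
--     'ga', 'ge', 'as', 'se', 'br', 'kr', 'rb', 'sr', 'y', 'zr',
--     'nb', 'mo', 'tc', 'ru', 'rh', 'pd', 'ag', 'cd', 'in', 'sn',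
--     'sb', 'te', 'i', 'xe', 'cs', 'ba', 'la', 'ce', 'pr', 'nd',
--     'pm', 'sm', 'eu', 'gd', 'tb', 'dy', 'ho', 'er', 'tm', 'yb',
--     'lu', 'hf', 'ta', 'w', 're', 'os', 'ir', 'pt', 'au', 'hg',
--     'tl', 'pb', 'bi', 'po', 'at', 'rn', 'fr', 'ra', 'ac', 'th',
--     'pa', 'u', 'np', 'pu', 'am', 'cm', 'bk', 'cf', 'es', 'fm',
--     'md', 'no', 'lr', 'rf', 'db', 'sg', 'bh', 'hs', 'mt', 'ds',
--     'rg', 'cn', 'uut', 'uuq', 'uup', 'uuh', 'uus', 'uuo')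
--
-- subtraction_table = {
--     'a':'13-17',
--     'd':'60-7',
--     'e':'2-1',
--     'g':'12-25',
--     'l':'13-91',
--     'm':'62-16',
--     'q':'114-92',
--     'r':'36-19',
--     't':'81-13',
--     'x':'54-10',
--     'z':'40-37',
-- }
--
-- def investigate_word(word):
--     if len(word) > 1:
--         try:
--             index = lookup_table.index(word)
--             return (str(index), len(word))
--         except:
--             # lookup inverse
--             try:
--                 index = lookup_table.index(word[::-1])
--                 return ('%d^-1' % index, len(word))
--             except:
--                 return investigate_word(word[:-1])
--     else:
--         try:
--             index = lookup_table.index(word)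
--             return (str(index), 1)
--         except:
--             if word in subtraction_table:
--                 return (subtraction_table[word], 1)
--             else:
--                 return (word, 1)
-- ===== SOURCE B (Python) =====
-- _SYMBOLS = (",h,he,li,be,b,c,n,o,f,ne,na,mg,al,si,p,s,cl,ar,k,ca,"
--     "sc,ti,v,cr,mn,fe,co,ni,cu,zn,ga,ge,as,se,br,kr,rb,sr,y,zr,"
--     "nb,mo,tc,ru,rh,pd,ag,cd,in,sn,sb,te,i,xe,cs,ba,la,ce,pr,nd,"
--     "pm,sm,eu,gd,tb,dy,ho,er,tm,yb,lu,hf,ta,w,re,os,ir,pt,au,hg,"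
--     "tl,pb,bi,po,at,rn,fr,ra,ac,th,pa,u,np,pu,am,cm,bk,cf,es,fm,"
--     "md,no,lr,rf,db,sg,bh,hs,mt,ds,rg,cn,uut,uuq,uup,uuh,uus,uuo")
-- _SUBTRACTIONS = "a:13-17,d:60-7,e:2-1,g:12-25,l:13-91,m:62-16,q:114-92,r:36-19,t:81-13,x:54-10,z:40-37"
--
-- _INDEX = {s: i for i, s in enumerate(_SYMBOLS.split(','))}
-- _SUB = dict(entry.split(':') for entry in _SUBTRACTIONS.split(','))
--
-- def investigate_word(word):
--     # iterative loop over decreasing prefix lengths with a hash index (no list scans, no exceptions)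
--     for length in range(len(word), 1, -1):
--         prefix = word[:length]
--         i = _INDEX.get(prefix)
--         if i is not None:
--             return (str(i), length)
--         j = _INDEX.get(prefix[::-1])
--         if j is not None:
--             return ('%d^-1' % j, length)
--     head = word[:1]
--     i = _INDEX.get(head)
--     if i is not None:
--         return (str(i), 1)
--     v = _SUB.get(head)
--     if v is not None:
--         return (v, 1)
--     return (head, 1)
-- ===== Notes on version B (the rewrite author's own statement) =====
-- stated objective: alternative
-- what changed: Replaces A's try/except recursion that linearly scans lookup_table with .index by an explicit loop over decreasing prefix lengths that looks prefixes up in a hash index (dict symbol->index) built once by parsing a comma-separated symbol string; the subtraction table is likewise a dict built by parsing a key:value string.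
import Mathlib
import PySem

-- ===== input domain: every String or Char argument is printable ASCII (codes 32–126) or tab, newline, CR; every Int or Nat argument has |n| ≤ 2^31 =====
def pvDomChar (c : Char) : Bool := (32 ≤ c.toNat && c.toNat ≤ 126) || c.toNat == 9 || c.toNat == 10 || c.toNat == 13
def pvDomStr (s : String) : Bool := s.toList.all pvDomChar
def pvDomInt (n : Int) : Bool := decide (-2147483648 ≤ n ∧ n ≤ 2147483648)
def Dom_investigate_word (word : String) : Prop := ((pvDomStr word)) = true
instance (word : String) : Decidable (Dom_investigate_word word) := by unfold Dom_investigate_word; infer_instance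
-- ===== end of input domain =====

-- B replaces A's list-scanning try/except recursion by an explicit loop over decreasing
-- prefix lengths looking prefixes up in a hash index (dict) built once by parsing a
-- comma-separated symbol string (objective: alternative decomposition and data structure).


-- ===== PORT A =====

-- lookup_table, as a list of character lists (strings handled on the List Char side per PySem)
def pvTable : List (List Char) :=
  (["", "h", "he", "li", "be", "b", "c", "n", "o", "f",
    "ne", "na", "mg", "al", "si", "p", "s", "cl", "ar", "k",
    "ca", "sc", "ti", "v", "cr", "mn", "fe", "co", "ni", "cu",
    "zn", "ga", "ge", "as", "se", "br", "kr", "rb", "sr", "y",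
    "zr", "nb", "mo", "tc", "ru", "rh", "pd", "ag", "cd", "in",
    "sn", "sb", "te", "i", "xe", "cs", "ba", "la", "ce", "pr",
    "nd", "pm", "sm", "eu", "gd", "tb", "dy", "ho", "er", "tm",
    "yb", "lu", "hf", "ta", "w", "re", "os", "ir", "pt", "au",
    "hg", "tl", "pb", "bi", "po", "at", "rn", "fr", "ra", "ac",
    "th", "pa", "u", "np", "pu", "am", "cm", "bk", "cf", "es",
    "fm", "md", "no", "lr", "rf", "db", "sg", "bh", "hs", "mt",
    "ds", "rg", "cn", "uut", "uuq", "uup", "uuh", "uus", "uuo"] : List String).map String.toList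

-- subtraction_table, an association list keyed by the one-character strings
def pvSub : List (List Char × String) :=
  [("a".toList, "13-17"),
    ("d".toList, "60-7"),
    ("e".toList, "2-1"),
    ("g".toList, "12-25"),
    ("l".toList, "13-91"),
    ("m".toList, "62-16"),
    ("q".toList, "114-92"),
    ("r".toList, "36-19"),
    ("t".toList, "81-13"),
    ("x".toList, "54-10"),
    ("z".toList, "40-37")]

-- A's recursion on the word with the last character dropped (word[:-1] = dropLast);
-- '.index' inside try/except is PySem.List.index? (some = found, none = ValueError branch);
-- word[::-1] is List.reverse (PySem.List.slice?_none_none_neg_one); '%d^-1' % i is toChars i ++ "^-1".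
def invA_core (cs : List Char) : String × Int :=
  if _h : 1 < cs.length then
    match PySem.List.index? pvTable cs with
    | some i => (PySem.Int.toStr (i : Int), (cs.length : Int))
    | none =>
      match PySem.List.index? pvTable cs.reverse with
      | some i => (String.ofList (PySem.Int.toChars (i : Int) ++ "^-1".toList), (cs.length : Int))
      | none => invA_core cs.dropLast
  else
    match PySem.List.index? pvTable cs with
    | some i => (PySem.Int.toStr (i : Int), 1)
    | none =>
      match List.lookup cs pvSub with
      | some v => (v, 1)
      | none => (String.ofList cs, 1)
termination_by cs.length
decreasing_by simp [List.length_dropLast]; omega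

def investigate_word (word : String) : String × Int :=
  invA_core word.toList

-- ===== PORT B =====

-- _SYMBOLS: B's comma-separated symbol string
def pvSymStr : List Char :=
  ",h,he,li,be,b,c,n,o,f,ne,na,mg,al,si,p,s,cl,ar,k,ca,sc,ti,v,cr,mn,fe,co,ni,cu,zn,ga,ge,as,se,br,kr,rb,sr,y,zr,nb,mo,tc,ru,rh,pd,ag,cd,in,sn,sb,te,i,xe,cs,ba,la,ce,pr,nd,pm,sm,eu,gd,tb,dy,ho,er,tm,yb,lu,hf,ta,w,re,os,ir,pt,au,hg,tl,pb,bi,po,at,rn,fr,ra,ac,th,pa,u,np,pu,am,cm,bk,cf,es,fm,md,no,lr,rf,db,sg,bh,hs,mt,ds,rg,cn,uut,uuq,uup,uuh,uus,uuo".toList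

-- _SUBTRACTIONS: B's comma-separated key:value string
def pvSubStr : List Char :=
  "a:13-17,d:60-7,e:2-1,g:12-25,l:13-91,m:62-16,q:114-92,r:36-19,t:81-13,x:54-10,z:40-37".toList

-- _INDEX = {s: i for i, s in enumerate(_SYMBOLS.split(','))}
def pvIndex : PySem.Dict (List Char) Int :=
  (PySem.List.enumerate (PySem.Chars.splitOn pvSymStr ",".toList) 0).foldl
    (fun d p => d.insert p.2 p.1) PySem.Dict.empty

-- _SUB = dict(entry.split(':') for entry in _SUBTRACTIONS.split(','))
-- (every entry of the literal constant splits into exactly two pieces; any other shape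
--  would raise in Python and is unreachable, ported as keeping d unchanged)
def pvSubDict : PySem.Dict (List Char) String :=
  (PySem.Chars.splitOn pvSubStr ",".toList).foldl
    (fun d entry =>
      match PySem.Chars.splitOn entry ":".toList with
      | [k, v] => d.insert k (String.ofList v)
      | _ => d)
    PySem.Dict.empty

-- the loop 'for length in range(len(word), 1, -1)': first hit returns, fall-through is none
-- (the module-global _INDEX / _SUB dicts are passed to the loop helpers as parameters)
def invB_loop (idx : PySem.Dict (List Char) Int) (cs : List Char) (lens : List Int) :
    Option (String × Int) :=
  match lens with
  | [] => none
  | L :: rest =>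
    match idx.get? (PySem.List.slice cs none (some L)) with   -- i = _INDEX.get(word[:length])
    | some i => some (PySem.Int.toStr i, L)
    | none =>
      match idx.get? (PySem.List.slice cs none (some L)).reverse with  -- j = _INDEX.get(prefix[::-1])
      | some j => some (String.ofList (PySem.Int.toChars j ++ "^-1".toList), L)
      | none => invB_loop idx cs rest

-- the code after the loop: head = word[:1]
def invB_tail (idx : PySem.Dict (List Char) Int) (sub : PySem.Dict (List Char) String)
    (cs : List Char) : String × Int :=
  match idx.get? (PySem.List.slice cs none (some 1)) with    -- head = word[:1]
  | some i => (PySem.Int.toStr i, 1)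
  | none =>
    match sub.get? (PySem.List.slice cs none (some 1)) with
    | some v => (v, 1)
    | none => (String.ofList (PySem.List.slice cs none (some 1)), 1)

def investigate_word_alt (word : String) : String × Int :=
  let cs := word.toList
  match invB_loop pvIndex cs (PySem.List.pyRange (cs.length : Int) 1 (-1)) with
  | some r => r
  | none => invB_tail pvIndex pvSubDict cs

-- ===== PRECONDITION & SPEC =====
def Spec_investigate_word (word : String) (out : String × Int) : Prop := out = investigate_word_alt word
instance (word : String) (out : String × Int) : Decidable (Spec_investigate_word word out) := by unfold Spec_investigate_word; infer_instance

-- ===== CLAIM (what is proved, stated in full; the proofs are below) =====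
def Claim_equal_investigate_word : Prop := ∀ (word : String), Dom_investigate_word word → Spec_investigate_word word (investigate_word word)

-- ===== LEMMAS AND PROOFS =====

-- B's symbol-string parse yields exactly A's lookup_table
set_option maxRecDepth 40000 in
theorem syms_eq : PySem.Chars.splitOn pvSymStr ",".toList = pvTable := by decide

set_option maxRecDepth 40000 in
theorem table_nodup : pvTable.Nodup := by decide

-- B's subtraction-string parse yields exactly A's subtraction_table as a literal dict
set_option maxRecDepth 40000 in
theorem subdict_eq : pvSubDict = PySem.Dict.mk pvSub := by decide

-- the dict built by folding insert over enumerate is first-index lookup (fresh, distinct keys)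
theorem get?_enum_fold (L : List (List Char)) (d : PySem.Dict (List Char) Int) (s : Int)
    (v : List Char) (hfresh : ∀ x ∈ L, d.contains x = false) (hnd : L.Nodup) :
    ((PySem.List.enumerate L s).foldl (fun d p => d.insert p.2 p.1) d).get? v =
      if d.contains v then d.get? v
      else (PySem.List.index? L v).map (fun n => (n : Int) + s) := by
  induction L generalizing d s with
  | nil =>
    rw [PySem.List.enumerate_nil]
    by_cases hc : d.contains v = true
    · simp [hc]
    · simp only [List.foldl_nil, PySem.List.index?_eq_idxOf?, List.idxOf?_nil]
      rw [if_neg hc, (PySem.Dict.get?_eq_none_iff_contains d v).mpr (by simpa using hc)]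
      rfl
  | cons x L ih =>
    rw [PySem.List.enumerate_cons, List.foldl_cons]
    obtain ⟨hx, hndL⟩ := List.nodup_cons.mp hnd
    have hfresh' : ∀ y ∈ L, (d.insert x s).contains y = false := by
      intro y hy
      rw [PySem.Dict.contains_insert]
      have : y ≠ x := fun h => hx (h ▸ hy)
      simp [this, hfresh y (List.mem_cons_of_mem _ hy)]
    rw [ih (d.insert x s) (s + 1) hfresh' hndL]
    by_cases hv : v = x
    · subst hv
      rw [if_pos (PySem.Dict.contains_insert_self d v s), PySem.Dict.get?_insert_self,
        if_neg (by simp [hfresh v List.mem_cons_self]),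
        PySem.List.index?_cons_self]
      simp
    · rw [PySem.Dict.contains_insert, PySem.Dict.get?_insert_of_ne d s hv]
      have hbeq : (v == x) = false := beq_eq_false_iff_ne.mpr hv
      rw [hbeq, Bool.false_or]
      by_cases hc : d.contains v = true
      · simp [hc]
      · rw [if_neg hc, if_neg hc,
          PySem.List.index?_cons_of_ne L (fun h => hv h.symm)]
        cases PySem.List.index? L v with
        | none => rfl
        | some m =>
          show some ((m : Int) + (s + 1)) = some (((m + 1 : Nat) : Int) + s)
          exact congrArg _ (by push_cast; ring)

-- B's index dict performs exactly A's lookup_table.index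
theorem pvIndex_get? (v : List Char) :
    pvIndex.get? v = (PySem.List.index? pvTable v).map (fun n => (n : Int)) := by
  unfold pvIndex
  rw [syms_eq, get?_enum_fold pvTable PySem.Dict.empty 0 v
    (fun x _ => PySem.Dict.contains_empty x) table_nodup]
  rw [if_neg (by simp [PySem.Dict.contains_empty])]
  cases PySem.List.index? pvTable v <;> simp

-- first-match get? of a literal dict is assoc-list lookup
theorem get?_mk_eq_lookup (l : List (List Char × String)) (x : List Char) :
    (PySem.Dict.mk l).get? x = l.lookup x := by
  induction l with
  | nil => rfl
  | cons p rest ih =>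
    obtain ⟨k, v⟩ := p
    rw [PySem.Dict.get?_mk_cons, List.lookup]
    by_cases h : x = k
    · simp [h]
    · simp [beq_eq_false_iff_ne.mpr h, beq_eq_false_iff_ne.mpr (Ne.symm h), ih]

-- B's subtraction dict performs exactly A's subtraction_table lookup
theorem pvSubDict_get? (v : List Char) : pvSubDict.get? v = List.lookup v pvSub := by
  rw [subdict_eq, get?_mk_eq_lookup]

-- the loop only looks at cs through slices cs[:L] for L in lens
theorem invB_loop_congr (idx : PySem.Dict (List Char) Int) (cs cs' : List Char) (lens : List Int)
    (h : ∀ L ∈ lens, PySem.List.slice cs none (some L) = PySem.List.slice cs' none (some L)) :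
    invB_loop idx cs lens = invB_loop idx cs' lens := by
  induction lens with
  | nil => rfl
  | cons L rest ih =>
    simp only [invB_loop, h L (List.mem_cons_self)]
    have := ih (fun L hL => h L (List.mem_cons_of_mem _ hL))
    split <;> [rfl; (split <;> [rfl; exact this])]

theorem take_dropLast_eq (cs : List Char) (k : Nat) (hk : k ≤ cs.length - 1) :
    cs.dropLast.take k = cs.take k := by
  rw [List.dropLast_eq_take, List.take_take]
  congr 1
  omega

theorem slice_dropLast_eq (cs : List Char) (L : Int) (h0 : 0 ≤ L) (hL : L.toNat ≤ cs.length - 1) :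
    PySem.List.slice cs none (some L) = PySem.List.slice cs.dropLast none (some L) := by
  rw [PySem.List.slice_to _ h0, PySem.List.slice_to _ h0, take_dropLast_eq cs L.toNat hL]

theorem key (n : Nat) : ∀ (cs : List Char), cs.length = n →
    invA_core cs =
      (match invB_loop pvIndex cs (PySem.List.pyRange (cs.length : Int) 1 (-1)) with
       | some r => r
       | none => invB_tail pvIndex pvSubDict cs) := by
  induction n using Nat.strong_induction_on with
  | _ n ih =>
  intro cs hlen
  by_cases hlt : 1 < cs.length
  · have hcons : PySem.List.pyRange (cs.length : Int) 1 (-1)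
        = (cs.length : Int) :: PySem.List.pyRange ((cs.length : Int) - 1) 1 (-1) :=
      PySem.List.pyRange_neg_one_cons (by exact_mod_cast hlt)
    rw [hcons]
    have hpre : PySem.List.slice cs none (some (cs.length : Int)) = cs := by
      rw [PySem.List.slice_to _ (by positivity)]
      simp
    rw [invA_core, dif_pos hlt]
    simp only [invB_loop, hpre, pvIndex_get?]
    cases hidx : PySem.List.index? pvTable cs with
    | some i => simp
    | none =>
      cases hrev : PySem.List.index? pvTable cs.reverse with
      | some i => simp
      | none =>
        have hdl : cs.dropLast.length = cs.length - 1 := by simp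
        have hloop : invB_loop pvIndex cs (PySem.List.pyRange ((cs.length : Int) - 1) 1 (-1))
            = invB_loop pvIndex cs.dropLast (PySem.List.pyRange ((cs.dropLast.length : Int)) 1 (-1)) := by
          have hcast : ((cs.dropLast.length : Int)) = (cs.length : Int) - 1 := by
            rw [hdl]; omega
          rw [hcast]
          apply invB_loop_congr
          intro L hL
          rw [PySem.List.mem_pyRange_neg_one] at hL
          exact slice_dropLast_eq cs L (by omega) (by omega)
        have htail : invB_tail pvIndex pvSubDict cs = invB_tail pvIndex pvSubDict cs.dropLast := by
          unfold invB_tail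
          rw [slice_dropLast_eq cs 1 (by norm_num) (by omega)]
        rw [hloop, htail]
        exact ih (cs.length - 1) (by omega) cs.dropLast (by omega)
  · have hnil : PySem.List.pyRange (cs.length : Int) 1 (-1) = [] :=
      PySem.List.pyRange_neg_one_eq_nil (by exact_mod_cast Nat.le_of_not_lt hlt)
    rw [hnil]
    simp only [invB_loop]
    rw [invA_core, dif_neg hlt]
    unfold invB_tail
    have hhead : PySem.List.slice cs none (some 1) = cs := by
      rw [PySem.List.slice_to _ (by norm_num)]
      exact List.take_of_length_le (by omega)
    rw [hhead, pvIndex_get?, pvSubDict_get?]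
    cases PySem.List.index? pvTable cs <;> rfl

-- ===== VERDICT (by name: the statement is the Claim_ definition above) =====
theorem investigate_word_spec : Claim_equal_investigate_word := by
  intro word _
  unfold Spec_investigate_word investigate_word investigate_word_alt
  exact key word.toList.length word.toList rfl
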